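-- pv_equiv track=rewrite | github.com/KevinS404/Python | cubosValidos.py | listaCubos
-- ===== SOURCE A (Python) =====
-- def sumaCubos(x,y):
--     suma = x**3 + y**3
--     return suma
--
-- def listaCubos(numero):
--     listaDeCubos = []
--     i = 1
--     while i <= numero:
--         j = 1
--         while j <= numero:
--             if sumaCubos(i,j) <= numero:
--                 if not [i,j] in listaDeCubos and not [j,i] in listaDeCubos:
--                     listaDeCubos.append([i,j])
--             j = j + 1
--         i = i + 1
--
--     return listaDeCubos
-- ===== SOURCE B (Python) =====
-- def listaCubos(numero):
--     listaDeCubos = []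
--     i = 1
--     while 2 * i ** 3 <= numero:
--         j = i
--         while i ** 3 + j ** 3 <= numero:
--             listaDeCubos.append([i, j])
--             j += 1
--         i += 1
--     return listaDeCubos
-- ===== Notes on version B (the rewrite author's own statement) =====
-- stated objective: faster
-- what changed: Loops are bounded by the cube conditions themselves (outer while 2*i^3<=numero, inner j from i while i^3+j^3<=numero) and pairs are appended directly, eliminating the O(n^2) scan space and the O(k) membership scans of the result list on every candidate.
import Mathlib
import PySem

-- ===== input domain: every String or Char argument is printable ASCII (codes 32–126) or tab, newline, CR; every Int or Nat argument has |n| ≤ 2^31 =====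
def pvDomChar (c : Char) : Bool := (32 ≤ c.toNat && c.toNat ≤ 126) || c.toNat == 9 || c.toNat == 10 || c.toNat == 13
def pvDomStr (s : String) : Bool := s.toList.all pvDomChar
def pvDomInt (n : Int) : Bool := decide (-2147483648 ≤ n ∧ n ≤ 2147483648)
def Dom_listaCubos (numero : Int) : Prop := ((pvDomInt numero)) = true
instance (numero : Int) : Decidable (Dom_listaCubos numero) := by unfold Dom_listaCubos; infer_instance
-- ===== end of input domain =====

-- B is a faster re-implementation: both loops are bounded by the cube conditions themselves
-- and pairs are appended directly, with no membership scan of the result list.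

-- ===== PORT A =====
def sumaCubos (x y : Int) : Int := x ^ 3 + y ^ 3

-- inner `while j <= numero` loop of A
def innerA (numero i j : Int) (acc : List (List Int)) : List (List Int) :=
  if j ≤ numero then
    innerA numero i (j + 1)
      (if sumaCubos i j ≤ numero then
        (if ¬ ([i, j] ∈ acc) ∧ ¬ ([j, i] ∈ acc) then acc ++ [[i, j]] else acc)
       else acc)
  else acc
termination_by (numero + 1 - j).toNat
decreasing_by omega

-- outer `while i <= numero` loop of A
def outerA (numero i : Int) (acc : List (List Int)) : List (List Int) :=
  if i ≤ numero then outerA numero (i + 1) (innerA numero i 1 acc) else acc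
termination_by (numero + 1 - i).toNat
decreasing_by omega

def listaCubos (numero : Int) : List (List Int) := outerA numero 1 []

-- ===== PORT B =====
-- helper facts the ports need for termination
theorem pv_le_cube {j : Int} (hj : 1 ≤ j) : j ≤ j ^ 3 := by nlinarith [sq_nonneg j]

-- inner `while i**3 + j**3 <= numero` loop of B (hi/hj carry the loop invariants 1 ≤ i, 1 ≤ j for termination)
def innerB (numero i j : Int) (hi : 1 ≤ i) (hj : 1 ≤ j) (acc : List (List Int)) : List (List Int) :=
  if h : i ^ 3 + j ^ 3 ≤ numero then
    innerB numero i (j + 1) hi (by omega) (acc ++ [[i, j]])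
  else acc
termination_by (numero + 1 - j).toNat
decreasing_by
  have h1 : j ≤ j ^ 3 := pv_le_cube hj
  have h2 : 1 ≤ i ^ 3 := le_trans hi (pv_le_cube hi)
  omega

-- outer `while 2 * i**3 <= numero` loop of B
def outerB (numero i : Int) (hi : 1 ≤ i) (acc : List (List Int)) : List (List Int) :=
  if h : 2 * i ^ 3 ≤ numero then
    outerB numero (i + 1) (by omega) (innerB numero i i hi hi acc)
  else acc
termination_by (numero + 1 - i).toNat
decreasing_by
  have h1 : i ≤ i ^ 3 := pv_le_cube hi
  omega

def listaCubos_alt (numero : Int) : List (List Int) := outerB numero 1 (by norm_num) []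

-- ===== PRECONDITION & SPEC =====
def Spec_listaCubos (numero : Int) (out : List (List Int)) : Prop := out = listaCubos_alt numero
instance (numero : Int) (out : List (List Int)) : Decidable (Spec_listaCubos numero out) := by unfold Spec_listaCubos; infer_instance

-- ===== CLAIM (what is proved, stated in full; the proofs are below) =====
def Claim_equal_listaCubos : Prop := ∀ (numero : Int), Dom_listaCubos numero → Spec_listaCubos numero (listaCubos numero)

-- ===== LEMMAS AND PROOFS =====

-- the row of pairs [i, j'] for a ≤ j' < b with i^3 + j'^3 ≤ n
def rowB (n i a b : Int) : List (List Int) :=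
  (((List.range (b - a).toNat).map (fun (k : Nat) => a + (k : Int))).filter
    (fun j => decide (i ^ 3 + j ^ 3 ≤ n))).map (fun j => [i, j])

-- the table of full rows for first components a ≤ x < b
def tabSeg (n a b : Int) : List (List Int) :=
  ((List.range (b - a).toNat).map (fun (k : Nat) => a + (k : Int))).flatMap
    (fun x => rowB n x x (n + 1))

theorem mem_rowB {n i a b x y : Int} :
    [x, y] ∈ rowB n i a b ↔ x = i ∧ a ≤ y ∧ y < b ∧ i ^ 3 + y ^ 3 ≤ n := by
  constructor
  · intro h
    obtain ⟨j, hj, hxy⟩ := List.mem_map.mp h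
    obtain ⟨hj1, hj2⟩ := List.mem_filter.mp hj
    obtain ⟨k, hk, rfl⟩ := List.mem_map.mp hj1
    rw [List.mem_range] at hk
    rw [decide_eq_true_eq] at hj2
    simp only [List.cons.injEq, and_true] at hxy
    obtain ⟨rfl, rfl⟩ := hxy
    refine ⟨rfl, by omega, by omega, hj2⟩
  · rintro ⟨rfl, h1, h2, hc⟩
    refine List.mem_map.mpr ⟨y, List.mem_filter.mpr ⟨List.mem_map.mpr
      ⟨(y - a).toNat, List.mem_range.mpr (by omega), by omega⟩, by simpa using hc⟩, rfl⟩

theorem mem_tabSeg {n a b x y : Int} :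
    [x, y] ∈ tabSeg n a b ↔ a ≤ x ∧ x < b ∧ x ≤ y ∧ y ≤ n ∧ x ^ 3 + y ^ 3 ≤ n := by
  constructor
  · intro h
    obtain ⟨c, hc, hm⟩ := List.mem_flatMap.mp h
    obtain ⟨k, hk, rfl⟩ := List.mem_map.mp hc
    rw [List.mem_range] at hk
    rw [mem_rowB] at hm
    obtain ⟨rfl, h1, h2, h3⟩ := hm
    exact ⟨by omega, by omega, h1, by omega, h3⟩
  · rintro ⟨h1, h2, h3, h4, h5⟩
    exact List.mem_flatMap.mpr ⟨x, List.mem_map.mpr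
      ⟨(x - a).toNat, List.mem_range.mpr (by omega), by omega⟩, mem_rowB.mpr ⟨rfl, h3, by omega, h5⟩⟩

theorem rowB_snoc {n i a b : Int} (hab : a ≤ b) (hc : i ^ 3 + b ^ 3 ≤ n) :
    rowB n i a (b + 1) = rowB n i a b ++ [[i, b]] := by
  have h : (b + 1 - a).toNat = (b - a).toNat + 1 := by omega
  rw [rowB, h, List.range_succ]
  simp only [List.map_append, List.filter_append, List.map_append, rowB]
  congr 1
  have hb : a + max (b - a) 0 = b := by omega
  simp [hb, hc]

theorem rowB_stable {n i a b : Int} (hab : a ≤ b) (hc : ¬ i ^ 3 + b ^ 3 ≤ n) :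
    rowB n i a (b + 1) = rowB n i a b := by
  have h : (b + 1 - a).toNat = (b - a).toNat + 1 := by omega
  rw [rowB, h, List.range_succ]
  simp only [List.map_append, List.filter_append, List.map_append, rowB]
  have hb : a + max (b - a) 0 = b := by omega
  simp [hb, hc]

theorem rowB_nil {n i a b : Int} (hba : b ≤ a) : rowB n i a b = [] := by
  have h : (b - a).toNat = 0 := by omega
  simp [rowB, h]

theorem tabSeg_snoc {n a b : Int} (hab : a ≤ b) :
    tabSeg n a (b + 1) = tabSeg n a b ++ rowB n b b (n + 1) := by
  have h : (b + 1 - a).toNat = (b - a).toNat + 1 := by omega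
  rw [tabSeg, h, List.range_succ]
  have hb : a + max (b - a) 0 = b := by omega
  simp [tabSeg, hb]

theorem tabSeg_nil {n a b : Int} (hba : b ≤ a) : tabSeg n a b = [] := by
  have h : (b - a).toNat = 0 := by omega
  simp [tabSeg, h]

theorem cube_le_cube {a b : Int} (_ha : 0 ≤ a) (hab : a ≤ b) : a ^ 3 ≤ b ^ 3 := by
  nlinarith [sq_nonneg a, sq_nonneg b, sq_nonneg (a + b)]

-- cons/empty shape lemmas for rowB used on the B side
theorem rowB_cons {n i a b : Int} (hab : a < b) (hc : i ^ 3 + a ^ 3 ≤ n) :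
    rowB n i a b = [i, a] :: rowB n i (a + 1) b := by
  have h : (b - a).toNat = (b - (a + 1)).toNat + 1 := by omega
  rw [rowB, h, List.range_succ_eq_map]
  simp only [List.map_cons, List.map_map]
  have hmap : ((List.range (b - (a + 1)).toNat).map ((fun (k : Nat) => a + (k : Int)) ∘ Nat.succ))
      = (List.range (b - (a + 1)).toNat).map (fun (k : Nat) => (a + 1) + (k : Int)) := by
    apply List.map_congr_left
    intro x _
    simp [Function.comp]
    ring
  rw [hmap]
  simp [rowB, hc]

theorem rowB_empty_of_fail {n i a b : Int} (_ha : 1 ≤ a) (hfail : ¬ i ^ 3 + a ^ 3 ≤ n) :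
    rowB n i a b = [] := by
  rw [rowB]
  apply List.map_eq_nil_iff.mpr
  apply List.filter_eq_nil_iff.mpr
  intro x hx
  obtain ⟨k, _, rfl⟩ := List.mem_map.mp hx
  have h1 : a ^ 3 ≤ (a + (k : Int)) ^ 3 := cube_le_cube (by omega) (by omega)
  simp only [decide_eq_true_eq]
  omega

theorem tabSeg_cons {n a b : Int} (hab : a < b) :
    tabSeg n a b = rowB n a a (n + 1) ++ tabSeg n (a + 1) b := by
  have h : (b - a).toNat = (b - (a + 1)).toNat + 1 := by omega
  rw [tabSeg, h, List.range_succ_eq_map]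
  simp only [List.map_cons, List.map_map, List.flatMap_cons, Nat.cast_zero, add_zero]
  congr 1
  have hmap : ((List.range (b - (a + 1)).toNat).map ((fun (k : Nat) => a + (k : Int)) ∘ Nat.succ))
      = (List.range (b - (a + 1)).toNat).map (fun (k : Nat) => (a + 1) + (k : Int)) := by
    apply List.map_congr_left
    intro x _
    simp [Function.comp]
    ring
  rw [hmap, tabSeg]

theorem innerA_eq (n i : Int) (_hi : 1 ≤ i) (hin : i ≤ n) :
    ∀ j, 1 ≤ j → j ≤ n + 1 →
      innerA n i j (tabSeg n 1 i ++ rowB n i i j) = tabSeg n 1 i ++ rowB n i i (n + 1) := by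
  have key : ∀ m : Nat, ∀ j, 1 ≤ j → j ≤ n + 1 → (n + 1 - j).toNat ≤ m →
      innerA n i j (tabSeg n 1 i ++ rowB n i i j) = tabSeg n 1 i ++ rowB n i i (n + 1) := by
    intro m
    induction m with
    | zero =>
      intro j h1 h2 hm
      have hj : j = n + 1 := by omega
      subst hj
      rw [innerA, if_neg (by omega)]
    | succ m ih =>
      intro j h1 h2 hm
      by_cases hjn : j ≤ n
      · rw [innerA, if_pos hjn]
        by_cases hc : sumaCubos i j ≤ n
        · have hc' : i ^ 3 + j ^ 3 ≤ n := hc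
          rw [if_pos hc]
          by_cases hij : i ≤ j
          · -- the pair is new: append, extending the row
            rw [if_pos (by
              constructor
              · intro hmem
                rcases List.mem_append.mp hmem with h | h
                · have := mem_tabSeg.mp h; omega
                · have := mem_rowB.mp h; omega
              · intro hmem
                rcases List.mem_append.mp hmem with h | h
                · have := mem_tabSeg.mp h; omega
                · have := mem_rowB.mp h; omega)]
            rw [List.append_assoc, ← rowB_snoc hij hc']
            exact ih (j + 1) (by omega) (by omega) (by omega)
          · -- j < i : [j, i] is already in the table, skip
            have hmem : [j, i] ∈ tabSeg n 1 i ++ rowB n i i j :=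
              List.mem_append_left _ (mem_tabSeg.mpr
                ⟨h1, by omega, by omega, hin, by nlinarith [hc']⟩)
            rw [if_neg (by intro hcon; exact hcon.2 hmem)]
            have hrw : rowB n i i j = rowB n i i (j + 1) := by
              rw [rowB_nil (by omega : j ≤ i), rowB_nil (by omega : (j + 1) ≤ i)]
            rw [hrw]
            exact ih (j + 1) (by omega) (by omega) (by omega)
        · rw [if_neg hc]
          have hc' : ¬ i ^ 3 + j ^ 3 ≤ n := hc
          have hrw : rowB n i i j = rowB n i i (j + 1) := by
            by_cases hij : i ≤ j
            · exact (rowB_stable hij hc').symm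
            · rw [rowB_nil (by omega : j ≤ i), rowB_nil (by omega : (j + 1) ≤ i)]
          rw [hrw]
          exact ih (j + 1) (by omega) (by omega) (by omega)
      · have hj : j = n + 1 := by omega
        subst hj
        rw [innerA, if_neg (by omega)]
  intro j h1 h2
  exact key (n + 1 - j).toNat j h1 h2 le_rfl

theorem outerA_eq (n : Int) :
    ∀ i, 1 ≤ i → i ≤ n + 1 → outerA n i (tabSeg n 1 i) = tabSeg n 1 (n + 1) := by
  have key : ∀ m : Nat, ∀ i, 1 ≤ i → i ≤ n + 1 → (n + 1 - i).toNat ≤ m →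
      outerA n i (tabSeg n 1 i) = tabSeg n 1 (n + 1) := by
    intro m
    induction m with
    | zero =>
      intro i h1 h2 hm
      have : i = n + 1 := by omega
      subst this
      rw [outerA, if_neg (by omega)]
    | succ m ih =>
      intro i h1 h2 hm
      by_cases hin : i ≤ n
      · rw [outerA, if_pos hin]
        have h0 : rowB n i i 1 = [] := rowB_nil h1
        have hinner := innerA_eq n i h1 hin 1 le_rfl (by omega)
        rw [h0, List.append_nil] at hinner
        rw [hinner, ← tabSeg_snoc h1]
        exact ih (i + 1) (by omega) (by omega) (by omega)
      · have : i = n + 1 := by omega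
        subst this
        rw [outerA, if_neg (by omega)]
  intro i h1 h2
  exact key (n + 1 - i).toNat i h1 h2 le_rfl

theorem innerB_eq (n i : Int) (hi : 1 ≤ i) :
    ∀ j (hj : 1 ≤ j) acc, innerB n i j hi hj acc = acc ++ rowB n i j (n + 1) := by
  have key : ∀ m : Nat, ∀ j (hj : 1 ≤ j) acc, (n + 1 - j).toNat ≤ m →
      innerB n i j hi hj acc = acc ++ rowB n i j (n + 1) := by
    intro m
    induction m with
    | zero =>
      intro j hj acc hm
      have hfail : ¬ i ^ 3 + j ^ 3 ≤ n := by
        have h1 : j ≤ j ^ 3 := pv_le_cube hj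
        have h2 : 1 ≤ i ^ 3 := le_trans hi (pv_le_cube hi)
        omega
      rw [innerB, dif_neg hfail, rowB_nil (by omega), List.append_nil]
    | succ m ih =>
      intro j hj acc hm
      rw [innerB]
      by_cases hc : i ^ 3 + j ^ 3 ≤ n
      · rw [dif_pos hc]
        have hjn : j ≤ n := by
          have h1 : j ≤ j ^ 3 := pv_le_cube hj
          have h2 : 1 ≤ i ^ 3 := le_trans hi (pv_le_cube hi)
          omega
        rw [ih (j + 1) (by omega) _ (by omega)]
        rw [rowB_cons (by omega : j < n + 1) hc]
        simp
      · rw [dif_neg hc, rowB_empty_of_fail hj hc, List.append_nil]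
  intro j hj acc
  exact key (n + 1 - j).toNat j hj acc le_rfl

theorem tabSeg_empty_of_big {n i : Int} (_hi : 1 ≤ i) (hbig : ¬ 2 * i ^ 3 ≤ n) :
    tabSeg n i (n + 1) = [] := by
  rw [tabSeg]
  apply List.flatMap_eq_nil_iff.mpr
  intro x hx
  obtain ⟨k, _, rfl⟩ := List.mem_map.mp hx
  have h1 : i ^ 3 ≤ (i + (k : Int)) ^ 3 := cube_le_cube (by omega) (by omega)
  exact rowB_empty_of_fail (by omega) (by omega)

theorem outerB_eq (n : Int) :
    ∀ i (hi : 1 ≤ i) acc, outerB n i hi acc = acc ++ tabSeg n i (n + 1) := by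
  have key : ∀ m : Nat, ∀ i (hi : 1 ≤ i) acc, (n + 1 - i).toNat ≤ m →
      outerB n i hi acc = acc ++ tabSeg n i (n + 1) := by
    intro m
    induction m with
    | zero =>
      intro i hi acc hm
      have hbig : ¬ 2 * i ^ 3 ≤ n := by
        have h1 : i ≤ i ^ 3 := pv_le_cube hi
        omega
      rw [outerB, dif_neg hbig, tabSeg_empty_of_big hi hbig, List.append_nil]
    | succ m ih =>
      intro i hi acc hm
      rw [outerB]
      by_cases hc : 2 * i ^ 3 ≤ n
      · rw [dif_pos hc]
        have hin : i ≤ n := by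
          have h1 : i ≤ i ^ 3 := pv_le_cube hi
          omega
        rw [innerB_eq n i hi i hi acc, ih (i + 1) (by omega) _ (by omega)]
        rw [tabSeg_cons (by omega : i < n + 1)]
        simp
      · rw [dif_neg hc, tabSeg_empty_of_big hi hc, List.append_nil]
  intro i hi acc
  exact key (n + 1 - i).toNat i hi acc le_rfl

-- ===== VERDICT (by name: the statement is the Claim_ definition above) =====
theorem listaCubos_spec : Claim_equal_listaCubos := by
  intro n _
  unfold Spec_listaCubos listaCubos listaCubos_alt
  rw [outerB_eq]
  by_cases hn : 1 ≤ n + 1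
  · have h0 : tabSeg n 1 1 = [] := tabSeg_nil le_rfl
    have := outerA_eq n 1 le_rfl hn
    rw [h0] at this
    rw [this]
    simp [tabSeg]
  · rw [outerA, if_neg (by omega), tabSeg_nil (by omega)]
    simp
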